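-- pv_equiv track=rewrite | github.com/andrewbarwise/Python-text-analyser | proj2.py | conjunctions
-- ===== SOURCE A (Python) =====
-- def conjunctions(textFile1,textFile2):
--     # create two empty dictionaries
--     conj1 = {}
--     conj2 = {}
--
--     # create a list that holds the words to be counted
--     wordList = ['also', 'although', 'and', 'as', 'because', 'before', 'but', 'for',
--      'if', 'nor', 'of', 'or', 'since', 'that', 'though', 'until', 'when', 'whenever',
--      'whereas', 'which', 'while', 'yet']
--
--     # set the counts to 0
--     for word in wordList:
--         conj1[word] = 0
--         conj2[word] = 0
--
--     # create two nested for loops to iterarte through both input files and wordList. must also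
--     # count the occurences of the specified words
--     for word in wordList:
--         for text in textFile1:
--             if word == text.lower():
--                 conj1[word] += 1
--
--     for word in wordList:
--         for text in textFile2:
--             if word == text.lower():
--                 conj2[word] += 1
--
--     return conj1, conj2
-- ===== SOURCE B (Python) =====
-- def conjunctions(textFile1, textFile2):
--     wordList = ['also', 'although', 'and', 'as', 'because', 'before', 'but', 'for',
--      'if', 'nor', 'of', 'or', 'since', 'that', 'though', 'until', 'when', 'whenever',
--      'whereas', 'which', 'while', 'yet']
--
--     def tally(tokens):
--         # one tabulating pass over the tokens ...
--         freq = {}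
--         for t in tokens:
--             w = t.lower()
--             freq[w] = freq.get(w, 0) + 1
--         # ... then a lookup-only projection onto the fixed word list
--         return {w: freq.get(w, 0) for w in wordList}
--
--     return tally(textFile1), tally(textFile2)
-- ===== Notes on version B (the rewrite author's own statement) =====
-- stated objective: faster
-- what changed: B replaces A's 22 full scans per file (one per conjunction word) by a single tabulating pass building a lowercased frequency dict per file, then a lookup-only projection onto the fixed word list.
import Mathlib
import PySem

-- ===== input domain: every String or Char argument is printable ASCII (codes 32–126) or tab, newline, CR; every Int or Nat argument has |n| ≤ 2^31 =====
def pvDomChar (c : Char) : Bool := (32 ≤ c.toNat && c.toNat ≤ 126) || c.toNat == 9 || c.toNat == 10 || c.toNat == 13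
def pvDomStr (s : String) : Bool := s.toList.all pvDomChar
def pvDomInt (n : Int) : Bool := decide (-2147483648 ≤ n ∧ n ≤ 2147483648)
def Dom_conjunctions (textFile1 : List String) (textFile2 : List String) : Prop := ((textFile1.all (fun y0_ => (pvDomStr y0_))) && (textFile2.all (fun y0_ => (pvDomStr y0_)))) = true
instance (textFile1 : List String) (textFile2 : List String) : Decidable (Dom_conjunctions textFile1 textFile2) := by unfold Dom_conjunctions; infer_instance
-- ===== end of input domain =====

-- B replaces A's 22 per-word scans of each file by one tabulating pass (a frequency dict of
-- lowercased tokens) followed by a lookup-only projection onto the fixed word list.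

-- the fixed conjunction word list (shared literal constant of both programs)
def pvWordList : List String := ["also", "although", "and", "as", "because", "before", "but", "for",
  "if", "nor", "of", "or", "since", "that", "though", "until", "when", "whenever",
  "whereas", "which", "while", "yet"]

-- ===== PORT A =====
def conjunctions (textFile1 : List String) (textFile2 : List String) : (List (String × Int)) × (List (String × Int)) :=
  -- set the counts to 0 (one loop filling both dicts)
  let init : PySem.Dict String Int × PySem.Dict String Int :=
    pvWordList.foldl (fun p word => (p.1.insert word 0, p.2.insert word 0))
      (PySem.Dict.empty, PySem.Dict.empty)
  -- nested loops: for each word, scan the whole file (conj1[word] += 1 on a present key)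
  let conj1 := pvWordList.foldl (fun conj word =>
      textFile1.foldl (fun conj text =>
        if word == PySem.Str.lower text then conj.insert word (conj.getD word 0 + 1) else conj)
        conj) init.1
  let conj2 := pvWordList.foldl (fun conj word =>
      textFile2.foldl (fun conj text =>
        if word == PySem.Str.lower text then conj.insert word (conj.getD word 0 + 1) else conj)
        conj) init.2
  (conj1.items, conj2.items)

-- ===== PORT B =====
def pvTally (tokens : List String) : List (String × Int) :=
  -- one tabulating pass ...
  let freq := tokens.foldl (fun d t =>
    let w := PySem.Str.lower t
    d.insert w (d.getD w 0 + 1)) PySem.Dict.empty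
  -- ... then a lookup-only projection
  pvWordList.map (fun w => (w, freq.getD w 0))

def conjunctions_alt (textFile1 : List String) (textFile2 : List String) : (List (String × Int)) × (List (String × Int)) :=
  (pvTally textFile1, pvTally textFile2)

-- ===== PRECONDITION & SPEC =====
def Spec_conjunctions (textFile1 : List String) (textFile2 : List String) (out : (List (String × Int)) × (List (String × Int))) : Prop := out = conjunctions_alt textFile1 textFile2
instance (textFile1 : List String) (textFile2 : List String) (out : (List (String × Int)) × (List (String × Int))) : Decidable (Spec_conjunctions textFile1 textFile2 out) := by unfold Spec_conjunctions; infer_instance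

-- ===== CLAIM (what is proved, stated in full; the proofs are below) =====
def Claim_equal_conjunctions : Prop := ∀ (textFile1 : List String) (textFile2 : List String), Dom_conjunctions textFile1 textFile2 → Spec_conjunctions textFile1 textFile2 (conjunctions textFile1 textFile2)

-- ===== LEMMAS AND PROOFS =====

set_option maxHeartbeats 1000000
set_option maxRecDepth 4000

-- A's per-word count of file tf
def cntA (word : String) (tf : List String) : Int :=
  (tf.countP (fun t => word == PySem.Str.lower t) : Int)

-- the zeroed dict after A's initialisation loop
def pvZeroDict : PySem.Dict String Int := PySem.Dict.mk (pvWordList.map (fun w => (w, 0)))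

lemma init_eq :
    pvWordList.foldl (fun (p : PySem.Dict String Int × PySem.Dict String Int) word =>
        (p.1.insert word 0, p.2.insert word 0)) (PySem.Dict.empty, PySem.Dict.empty)
      = (pvZeroDict, pvZeroDict) := by decide

lemma zeroDict_getD (k : String) (hk : k ∈ pvWordList) : pvZeroDict.getD k 0 = 0 := by
  fin_cases hk <;> decide

-- the inner scan of A: getD characterisation
lemma innerA_getD (word : String) (tf : List String) (d : PySem.Dict String Int) (k : String) :
    (tf.foldl (fun conj text =>
        if word == PySem.Str.lower text then conj.insert word (conj.getD word 0 + 1) else conj)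
      d).getD k 0
    = if k = word then d.getD word 0 + cntA word tf else d.getD k 0 := by
  induction tf generalizing d with
  | nil => rcases eq_or_ne k word with h | h <;> simp [cntA, h]

  | cons t ts ih =>
    simp only [List.foldl_cons, ih, cntA, List.countP_cons]
    by_cases hm : (word == PySem.Str.lower t) = true
    · simp [hm, PySem.Dict.getD_insert]
      split_ifs <;> simp_all <;> omega
    · simp [hm]

-- the inner scan preserves the key list when the word is already present
lemma innerA_keys (word : String) (tf : List String) (d : PySem.Dict String Int)
    (h : d.contains word = true) :
    (tf.foldl (fun conj text =>
        if word == PySem.Str.lower text then conj.insert word (conj.getD word 0 + 1) else conj)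
      d).keys = d.keys := by
  induction tf generalizing d with
  | nil => rfl
  | cons t ts ih =>
    simp only [List.foldl_cons]
    by_cases hm : (word == PySem.Str.lower t) = true
    · simp only [hm, if_pos]
      rw [ih _ (by simp [PySem.Dict.contains_insert_self]),
          PySem.Dict.keys_insert_of_contains _ _ h]
    · simp only [hm]
      simpa using ih d h

-- A's outer loop: getD characterisation over a duplicate-free word list
lemma outerA_getD (tf : List String) (ws : List String) (d : PySem.Dict String Int) (k : String)
    (hnd : ws.Nodup) :
    (ws.foldl (fun conj word =>
        tf.foldl (fun conj text =>
          if word == PySem.Str.lower text then conj.insert word (conj.getD word 0 + 1) else conj)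
          conj) d).getD k 0
    = d.getD k 0 + (if k ∈ ws then cntA k tf else 0) := by
  induction ws generalizing d with
  | nil => simp
  | cons w ws ih =>
    simp only [List.foldl_cons]
    rw [ih _ (List.Nodup.of_cons hnd), innerA_getD]
    rcases List.nodup_cons.mp hnd with ⟨hw, _⟩
    by_cases hk : k = w
    · subst hk
      simp [hw]
    · simp [hk, List.mem_cons]

-- A's outer loop preserves the key list when every word is already a key
lemma outerA_keys (tf : List String) (ws : List String) (d : PySem.Dict String Int)
    (h : ∀ w ∈ ws, d.contains w = true) :
    (ws.foldl (fun conj word =>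
        tf.foldl (fun conj text =>
          if word == PySem.Str.lower text then conj.insert word (conj.getD word 0 + 1) else conj)
          conj) d).keys = d.keys := by
  induction ws generalizing d with
  | nil => rfl
  | cons w ws ih =>
    simp only [List.foldl_cons]
    have hkeys := innerA_keys w tf d (h w (List.mem_cons_self ..))
    rw [ih, hkeys]
    intro w' hw'
    rw [PySem.Dict.contains_iff_mem_keys] at *
    rw [hkeys]
    exact (PySem.Dict.contains_iff_mem_keys ..).mp (h w' (List.mem_cons_of_mem _ hw'))

-- B's frequency dict looked up at w = A's per-word count
lemma freq_getD (tf : List String) (w : String) :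
    (tf.foldl (fun d t =>
        let x := PySem.Str.lower t
        d.insert x (d.getD x 0 + 1)) PySem.Dict.empty).getD w 0 = cntA w tf := by
  have h := PySem.Dict.getD_foldl_insert_add_one (l := tf.map PySem.Str.lower)
    (d := (PySem.Dict.empty : PySem.Dict String Int)) (v := w)
  rw [List.foldl_map] at h
  simp only [h, PySem.Dict.getD_empty, zero_add, cntA, List.count_eq_countP, List.countP_map]
  congr 1
  apply List.countP_congr
  intro t _
  simp only [Function.comp_apply, beq_iff_eq]
  exact eq_comm

-- one file's whole computation in A equals B's tally
lemma side_eq (tf : List String) :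
    (pvWordList.foldl (fun conj word =>
        tf.foldl (fun conj text =>
          if word == PySem.Str.lower text then conj.insert word (conj.getD word 0 + 1) else conj)
          conj) pvZeroDict).items = pvTally tf := by
  set c := pvWordList.foldl (fun conj word =>
      tf.foldl (fun conj text =>
        if word == PySem.Str.lower text then conj.insert word (conj.getD word 0 + 1) else conj)
        conj) pvZeroDict with hc
  have hzkeys : pvZeroDict.keys = pvWordList := by decide
  have hkeys : c.keys = pvWordList := by
    rw [hc, outerA_keys, hzkeys]
    intro w hw
    rw [PySem.Dict.contains_iff_mem_keys, hzkeys]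
    exact hw
  have hnd : c.keys.Nodup := by rw [hkeys]; decide
  rw [PySem.Dict.items_eq_map_keys c hnd 0, hkeys, pvTally]
  apply List.map_congr_left
  intro w hw
  have : c.getD w 0 = cntA w tf := by
    rw [hc, outerA_getD _ _ _ _ (by decide), zeroDict_getD _ hw]
    simp [hw]
  rw [this, freq_getD]

-- ===== VERDICT (by name: the statement is the Claim_ definition above) =====
theorem conjunctions_spec : Claim_equal_conjunctions := by
  intro tf1 tf2 _
  show conjunctions tf1 tf2 = conjunctions_alt tf1 tf2
  rw [conjunctions, conjunctions_alt, init_eq]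
  exact Prod.ext (side_eq tf1) (side_eq tf2)
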